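-- pv_equiv track=rewrite | github.com/amatelas123/music-share-plate | server.py | extract_latest_line_from_srt
-- ===== SOURCE A (Python) =====
-- def extract_latest_line_from_srt(srt_text: str) -> str:
--     if not srt_text:
--         return ""
--     blocks = [block.strip() for block in srt_text.strip().split('\n\n') if block.strip()]
--     if not blocks:
--         return ""
--     lines = blocks[-1].splitlines()
--     if len(lines) >= 3:
--         return lines[-1]
--     return lines[-1] if lines else ""
-- ===== SOURCE B (Python) =====
-- def extract_latest_line_from_srt(srt_text: str) -> str:
--     t = srt_text.strip()
--     if not t:
--         return ""
--     k = t.rfind('\n\n')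
--     u = t[(k + 2) if k >= 0 else 0:].lstrip()
--     i = max(u.rfind('\n'), u.rfind('\r'))
--     return u[i + 1:]
-- ===== Notes on version B (the rewrite author's own statement) =====
-- stated objective: alternative
-- what changed: Instead of materialising the full list of stripped blank-line-separated blocks and then the list of lines of the last one, B locates the answer directly with three backward searches (rfind of the block separator, then of the two line-break characters) and returns a single slice.
import Mathlib
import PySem

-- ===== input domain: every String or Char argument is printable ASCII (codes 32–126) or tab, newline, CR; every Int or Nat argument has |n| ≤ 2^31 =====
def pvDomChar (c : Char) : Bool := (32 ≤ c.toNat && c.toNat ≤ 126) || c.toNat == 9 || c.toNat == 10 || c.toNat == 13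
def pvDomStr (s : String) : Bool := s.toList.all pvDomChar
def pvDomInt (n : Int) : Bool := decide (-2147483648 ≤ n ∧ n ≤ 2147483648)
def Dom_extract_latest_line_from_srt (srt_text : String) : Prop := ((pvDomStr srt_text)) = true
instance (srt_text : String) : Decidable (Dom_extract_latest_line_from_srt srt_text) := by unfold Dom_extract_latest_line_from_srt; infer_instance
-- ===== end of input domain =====

-- B replaces A's materialised block/line lists by three backward searches (rfind of "\n\n", then of "\n" and "\r") and one slice; same return value on the stated domain.

-- ===== PORT A =====
def extract_latest_line_from_srt (srt_text : String) : String :=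
  if srt_text.toList.isEmpty then "" else
  let blocks := ((PySem.Chars.splitOn (PySem.Chars.strip srt_text.toList) ['\n', '\n']).map
      PySem.Chars.strip).filter (fun b => !b.isEmpty)
  if blocks.isEmpty then "" else
  let lines := PySem.Chars.splitlines ((PySem.List.pyGet? blocks (-1)).getD [])
  if 3 ≤ lines.length then String.ofList ((PySem.List.pyGet? lines (-1)).getD [])
  else if !lines.isEmpty then String.ofList ((PySem.List.pyGet? lines (-1)).getD []) else ""

-- ===== PORT B =====
def extract_latest_line_from_srt_alt (srt_text : String) : String :=
  let t := PySem.Chars.strip srt_text.toList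
  if t.isEmpty then "" else
  let k := PySem.Chars.rfind t ['\n', '\n']
  let u := PySem.Chars.lstrip (PySem.Chars.slice t (some (if 0 ≤ k then k + 2 else 0)) none)
  let i := max (PySem.Chars.rfind u ['\n']) (PySem.Chars.rfind u ['\r'])
  String.ofList (PySem.Chars.slice u (some (i + 1)) none)

-- ===== PRECONDITION & SPEC =====
def Spec_extract_latest_line_from_srt (srt_text : String) (out : String) : Prop := out = extract_latest_line_from_srt_alt srt_text
instance (srt_text : String) (out : String) : Decidable (Spec_extract_latest_line_from_srt srt_text out) := by unfold Spec_extract_latest_line_from_srt; infer_instance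

-- ===== CLAIM (what is proved, stated in full; the proofs are below) =====
def Claim_equal_extract_latest_line_from_srt : Prop := ∀ (srt_text : String), Dom_extract_latest_line_from_srt srt_text → Spec_extract_latest_line_from_srt srt_text (extract_latest_line_from_srt srt_text)

-- ===== LEMMAS AND PROOFS =====

def brkC (c : Char) : Bool := c == '\n' || c == '\r'
def tailNB (v : List Char) : List Char := (List.takeWhile (fun c => !brkC c) v.reverse).reverse

lemma single_isPrefixOf (b : Char) (l : List Char) :
    [b].isPrefixOf l = true ↔ l.head? = some b := by
  cases l with
  | nil => simp [List.isPrefixOf]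
  | cons a t => rw [List.isPrefixOf_iff_prefix, List.cons_prefix_cons]; simp [eq_comm]

lemma not_ws_not_brk (c : Char) (h : PySem.Chars.isspace c = false) : brkC c = false := by
  by_contra hb
  simp only [brkC, Bool.not_eq_false, Bool.or_eq_true, beq_iff_eq] at hb
  rcases hb with rfl | rfl <;> exact absurd h (by decide)

lemma pyGet_neg_one {A : Type} (xs : List A) : PySem.List.pyGet? xs (-1) = xs.getLast? := by
  cases xs with
  | nil => rfl
  | cons a t =>
    simp only [PySem.List.pyGet?, PySem.List.pyIdx?]
    norm_num
    simp [List.getLast?_eq_getElem?, List.getElem?_eq_getElem]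

lemma takeWhile_all_eq {p : Char → Bool} (l : List Char) (h : ∀ c ∈ l, p c = true) :
    List.takeWhile p l = l := by
  induction l with
  | nil => rfl
  | cons a t ih => rw [List.takeWhile_cons_of_pos (h a (by simp))]; rw [ih (fun c hc => h c (by simp [hc]))]

lemma tailNB_of_not_any (v : List Char) (h : v.any brkC = false) : tailNB v = v := by
  unfold tailNB
  rw [takeWhile_all_eq, List.reverse_reverse]
  intro c hc
  simp only [List.mem_reverse] at hc
  simp [List.any_eq_false.mp h c hc]

lemma takeWhile_append_of_ne {p : Char → Bool} (xs ys : List Char) (h : ¬ ∀ c ∈ xs, p c = true) :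
    List.takeWhile p (xs ++ ys) = List.takeWhile p xs := by
  rw [List.takeWhile_append]
  rw [if_neg]
  intro hlen
  have hx := (List.takeWhile_prefix p (l := xs)).eq_of_length hlen
  exact h (List.takeWhile_eq_self_iff.mp hx)

lemma tailNB_cons_of_any (c : Char) (v : List Char) (h : v.any brkC = true) :
    tailNB (c :: v) = tailNB v := by
  unfold tailNB
  rw [List.reverse_cons, takeWhile_append_of_ne]
  obtain ⟨b, hb, hbrk⟩ := List.any_eq_true.mp h
  intro hall
  have := hall b (by simp [hb])
  simp [hbrk] at this

lemma tailNB_cons_brk (c : Char) (v : List Char) (hc : brkC c = true) (h : v.any brkC = false) :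
    tailNB (c :: v) = v := by
  unfold tailNB
  rw [List.reverse_cons, List.takeWhile_append, if_pos, List.takeWhile_cons_of_neg (by simp [hc])]
  · simp
  · rw [takeWhile_all_eq]
    intro b hb
    simp only [List.mem_reverse] at hb
    simp [List.any_eq_false.mp h b hb]

lemma rfind_go_eq (s sub : List Char) (n : Nat) :
    PySem.Chars.rfind.go s sub n =
      if ∃ j ≤ n, sub.isPrefixOf (s.drop j) = true
      then ((Nat.findGreatest (fun j => sub.isPrefixOf (s.drop j) = true) n : Nat) : Int) else -1 := by
  induction n with
  | zero =>
    rw [PySem.Chars.rfind.go]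
    by_cases h : sub.isPrefixOf s = true
    · rw [if_pos h, if_pos ⟨0, le_refl 0, by simpa using h⟩]
      simp [Nat.findGreatest]
    · rw [if_neg h, if_neg ?_]
      rintro ⟨j, hj, hp⟩
      interval_cases j
      simp_all
  | succ n ih =>
    rw [PySem.Chars.rfind.go]
    by_cases h : sub.isPrefixOf (s.drop (n+1)) = true
    · have hex : ∃ j ≤ n+1, sub.isPrefixOf (s.drop j) = true := ⟨n+1, le_refl _, h⟩
      rw [if_pos h, if_pos hex, Nat.findGreatest_succ, if_pos h]
    · rw [if_neg h, ih]
      have : (∃ j ≤ n+1, sub.isPrefixOf (s.drop j) = true) ↔ (∃ j ≤ n, sub.isPrefixOf (s.drop j) = true) := by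
        constructor
        · rintro ⟨j, hj, hp⟩
          rcases Nat.lt_or_ge j (n+1) with hlt | hge
          · exact ⟨j, Nat.lt_succ_iff.mp hlt, hp⟩
          · exact absurd hp (by have : j = n+1 := le_antisymm hj hge; rw [this]; simpa using h)
        · rintro ⟨j, hj, hp⟩; exact ⟨j, Nat.le_succ_of_le hj, hp⟩
      rw [Nat.findGreatest_succ, if_neg h]
      by_cases hex : ∃ j ≤ n, sub.isPrefixOf (s.drop j) = true
      · rw [if_pos (this.mpr hex), if_pos hex]
      · rw [if_neg (fun hh => hex (this.mp hh)), if_neg hex]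

lemma prefix_false_of_long (s sub : List Char) (hsub : sub ≠ []) (j : Nat) (hj : s.length ≤ j) :
    sub.isPrefixOf (s.drop j) = false := by
  have : s.drop j = [] := List.drop_eq_nil_of_le hj
  rw [this]
  cases sub with
  | nil => exact absurd rfl hsub
  | cons a l => rfl

lemma rfind_neg (s sub : List Char) (hsub : sub ≠ [])
    (h : PySem.Chars.rfind s sub = -1) : ∀ j, sub.isPrefixOf (s.drop j) = false := by
  intro j
  rw [PySem.Chars.rfind, rfind_go_eq] at h
  rcases Nat.lt_or_ge j s.length with hlt | hge
  · by_contra hp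
    simp only [Bool.not_eq_false] at hp
    rw [if_pos ⟨j, le_of_lt hlt, hp⟩] at h
    omega
  · exact prefix_false_of_long s sub hsub j hge

lemma rfind_nonneg_spec (s sub : List Char) (hsub : sub ≠ [])
    (h : 0 ≤ PySem.Chars.rfind s sub) :
    sub.isPrefixOf (s.drop (PySem.Chars.rfind s sub).toNat) = true ∧
      (∀ j, (PySem.Chars.rfind s sub).toNat < j → sub.isPrefixOf (s.drop j) = false) := by
  rw [PySem.Chars.rfind, rfind_go_eq] at h ⊢
  by_cases hex : ∃ j ≤ s.length, sub.isPrefixOf (s.drop j) = true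
  · rw [if_pos hex]
    obtain ⟨j, hj, hp⟩ := hex
    have hspec := Nat.findGreatest_spec (P := fun j => sub.isPrefixOf (List.drop j s) = true) hj hp
    refine ⟨by simpa using hspec, ?_⟩
    intro i hi
    simp only [Int.toNat_natCast] at hi
    rcases Nat.lt_or_ge s.length i with hge | hle
    · exact prefix_false_of_long s sub hsub i (le_of_lt hge)
    · exact Bool.eq_false_iff.mpr (by
        have := Nat.findGreatest_is_greatest hi hle
        simpa using this)
  · rw [if_neg hex] at h
    omega

lemma rstrip_eq_self (v : List Char) (c : Char) (hl : v.getLast? = some c)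
    (hc : PySem.Chars.isspace c = false) : PySem.Chars.rstrip v = v := by
  unfold PySem.Chars.rstrip
  have hrev : v.reverse.head? = some c := by rw [List.head?_reverse]; exact hl
  cases hv : v.reverse with
  | nil => simp [hv] at hrev
  | cons a t =>
    rw [hv] at hrev
    simp only [List.head?_cons, Option.some.injEq] at hrev
    rw [List.dropWhile_cons_of_neg (by rw [hrev]; simp [hc]), ← hv, List.reverse_reverse]

lemma strip_last_not_ws (s : List Char) (c : Char) (h : (PySem.Chars.strip s).getLast? = some c) :
    PySem.Chars.isspace c = false := by
  unfold PySem.Chars.strip PySem.Chars.rstrip at h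
  rw [List.getLast?_reverse] at h
  have := List.head_dropWhile_not PySem.Chars.isspace (l := (PySem.Chars.lstrip s).reverse)
  cases hd : List.dropWhile PySem.Chars.isspace (PySem.Chars.lstrip s).reverse with
  | nil => simp [hd] at h
  | cons a t =>
    rw [hd] at h
    simp only [List.head?_cons, Option.some.injEq] at h
    have h2 := this (by simp [hd])
    simp only [hd] at h2
    simpa [h] using h2

lemma strip_head_not_ws (s : List Char) (c : Char) (h : (PySem.Chars.strip s).head? = some c) :
    PySem.Chars.isspace c = false := by
  unfold PySem.Chars.strip at h
  -- rstrip is a prefix of lstrip s, both nonempty share head; head of lstrip not ws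
  have hpre : PySem.Chars.rstrip (PySem.Chars.lstrip s) <+: PySem.Chars.lstrip s := by
    unfold PySem.Chars.rstrip
    have : List.dropWhile PySem.Chars.isspace (PySem.Chars.lstrip s).reverse <:+ (PySem.Chars.lstrip s).reverse :=
      List.dropWhile_suffix _
    exact List.reverse_suffix.mp (by simpa using this)
  obtain ⟨tail, htail⟩ := hpre
  have hh : (PySem.Chars.lstrip s).head? = some c := by
    rw [← htail]
    cases hx : PySem.Chars.rstrip (PySem.Chars.lstrip s) with
    | nil => rw [hx] at h; simp at h
    | cons a t => rw [hx] at h; simp only [List.head?_cons, Option.some.injEq] at h; simp [h]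
  unfold PySem.Chars.lstrip at hh
  have := List.head_dropWhile_not PySem.Chars.isspace (l := s)
  cases hd : List.dropWhile PySem.Chars.isspace s with
  | nil => simp [hd] at hh
  | cons a t =>
    rw [hd] at hh
    simp only [List.head?_cons, Option.some.injEq] at hh
    have h2 := this (by simp [hd])
    simp only [hd] at h2
    simpa [hh] using h2

lemma strip_eq_lstrip (v : List Char) (c : Char) (hl : v.getLast? = some c)
    (hc : PySem.Chars.isspace c = false) : PySem.Chars.strip v = PySem.Chars.lstrip v := by
  unfold PySem.Chars.strip
  cases hx : PySem.Chars.lstrip v with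
  | nil => simp [PySem.Chars.rstrip]
  | cons a t =>
    have hsuf : PySem.Chars.lstrip v <:+ v := List.dropWhile_suffix _
    have : (PySem.Chars.lstrip v).getLast? = some c := by
      obtain ⟨w, hw⟩ := hsuf
      rw [← hw] at hl
      rwa [List.getLast?_append_of_ne_nil (l₁ := w) (by rw [hx]; simp)] at hl
    rw [← hx]
    exact rstrip_eq_self _ _ this hc

lemma lstrip_idem_head (v : List Char) (c : Char) (hh : v.head? = some c)
    (hc : PySem.Chars.isspace c = false) : PySem.Chars.lstrip v = v := by
  unfold PySem.Chars.lstrip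
  cases v with
  | nil => rfl
  | cons a t =>
    simp only [List.head?_cons, Option.some.injEq] at hh
    rw [List.dropWhile_cons_of_neg (by rw [hh]; simp [hc])]

lemma strip_idem (s : List Char) : PySem.Chars.strip (PySem.Chars.strip s) = PySem.Chars.strip s := by
  cases hx : PySem.Chars.strip s with
  | nil => simp [PySem.Chars.strip, PySem.Chars.lstrip, PySem.Chars.rstrip]
  | cons a t =>
    have hh : (PySem.Chars.strip s).head? = some a := by rw [hx]; rfl
    have hhead := strip_head_not_ws s a hh
    obtain ⟨c, hcl⟩ : ∃ c, (PySem.Chars.strip s).getLast? = some c := by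
      rw [hx]; exact ⟨(a :: t).getLast (by simp), List.getLast?_eq_some_getLast _⟩
    have hlast := strip_last_not_ws s c hcl
    conv_lhs => unfold PySem.Chars.strip
    rw [lstrip_idem_head _ _ (by rfl) hhead]
    exact rstrip_eq_self _ _ (hx ▸ hcl) hlast

lemma splitOn_go_empty (sep cur : List Char) (acc : List (List Char)) (fuel : Nat) :
    PySem.Chars.splitOn.go sep (fuel+1) [] cur acc = (cur.reverse :: acc).reverse := by
  rw [PySem.Chars.splitOn.go]
  omega

lemma splitOn_go_cons (sep cur : List Char) (c : Char) (rest : List Char) (acc : List (List Char)) (fuel : Nat) :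
    PySem.Chars.splitOn.go sep (fuel+1) (c :: rest) cur acc =
      if sep.isPrefixOf (c :: rest) then
        PySem.Chars.splitOn.go sep fuel (List.drop sep.length (c :: rest)) [] (cur.reverse :: acc)
      else PySem.Chars.splitOn.go sep fuel rest (c :: cur) acc := by
  rw [PySem.Chars.splitOn.go]

lemma splitOn_go_nosep (sep : List Char) (hsep : sep ≠ []) (fuel : Nat) :
    ∀ (l cur : List Char) (accL : List (List Char)), l.length < fuel →
      (∀ j, sep.isPrefixOf (l.drop j) = false) →
      PySem.Chars.splitOn.go sep fuel l cur accL = accL.reverse ++ [cur.reverse ++ l] := by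
  induction fuel with
  | zero => intro l cur accL h; omega
  | succ fuel ih =>
    intro l cur accL hlen hnp
    cases l with
    | nil => rw [splitOn_go_empty]; simp
    | cons c rest =>
      rw [splitOn_go_cons, if_neg (by have := hnp 0; simp at this; simp [this])]
      rw [ih rest (c :: cur) accL (by simp at hlen ⊢; omega)
        (fun j => by have := hnp (j+1); simpa using this)]
      simp

lemma splitOn_go_last (fuel : Nat) :
    ∀ (l cur : List Char) (accL : List (List Char)), l.length < fuel →
      (∃ j, (['\n', '\n'] : List Char).isPrefixOf (l.drop j) = true) →
      ∃ j, (['\n', '\n'] : List Char).isPrefixOf (l.drop j) = true ∧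
        (∀ i, j + 1 < i → (['\n', '\n'] : List Char).isPrefixOf (l.drop i) = false) ∧
        (PySem.Chars.splitOn.go (['\n', '\n'] : List Char) fuel l cur accL).getLast? = some (l.drop (j + 2)) := by
  induction fuel with
  | zero => intro l cur accL h; omega
  | succ fuel ih =>
    intro l cur accL hlen hocc
    cases l with
    | nil =>
      obtain ⟨j, hj⟩ := hocc
      simp at hj
    | cons c rest =>
      by_cases hpre : (['\n', '\n'] : List Char).isPrefixOf (c :: rest) = true
      · rw [splitOn_go_cons, if_pos hpre]
        by_cases hocc2 : ∃ j, (['\n', '\n'] : List Char).isPrefixOf (((c :: rest).drop 2).drop j) = true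
        · obtain ⟨j', hp', hmax', hlast'⟩ := ih ((c :: rest).drop 2) [] (cur.reverse :: accL)
            (by simp at hlen ⊢; omega) hocc2
          refine ⟨j' + 2, ?_, ?_, ?_⟩
          · rw [List.drop_drop] at hp'
            rwa [show 2 + j' = j' + 2 from by omega] at hp'
          · intro i hi
            have h3 := hmax' (i - 2) (by omega)
            rwa [List.drop_drop, show 2 + (i - 2) = i from by omega] at h3
          · show (PySem.Chars.splitOn.go _ fuel (List.drop 2 (c :: rest)) [] _).getLast? = _
            rw [hlast', List.drop_drop, show 2 + (j' + 2) = j' + 2 + 2 from by omega]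
        · rw [splitOn_go_nosep _ (by simp) fuel _ [] _ (by simp [List.length_drop, List.length_cons] at hlen ⊢; omega)
            (fun j => by have := hocc2; push_neg at this; simpa using Bool.eq_false_iff.mpr (fun hb => this j hb))]
          refine ⟨0, by simpa using hpre, ?_, ?_⟩
          · intro i hi
            rw [show i = 2 + (i - 2) from by omega, ← List.drop_drop]
            push_neg at hocc2
            exact Bool.eq_false_iff.mpr (fun hb => hocc2 (i - 2) hb)
          · simp
      · rw [splitOn_go_cons, if_neg (by simpa using hpre)]
        have hocc3 : ∃ j, (['\n', '\n'] : List Char).isPrefixOf (rest.drop j) = true := by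
          obtain ⟨j, hj⟩ := hocc
          cases j with
          | zero => simp at hj; exact absurd (by simpa using hj) (by simpa using hpre)
          | succ j => exact ⟨j, by simpa using hj⟩
        obtain ⟨j', hp', hmax', hlast'⟩ := ih rest (c :: cur) accL (by simp at hlen ⊢; omega) hocc3
        refine ⟨j' + 1, by simpa using hp', ?_, ?_⟩
        · intro i hi
          have h2 : i = (i - 1) + 1 := by omega
          rw [h2]
          rw [show (c :: rest).drop ((i-1)+1) = rest.drop (i-1) from by simp]
          exact hmax' (i - 1) (by omega)
        · rw [hlast', show j' + 1 + 2 = (j' + 2) + 1 from by omega, List.drop_succ_cons]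

lemma char_beq_toNat (c d : Char) : (c == d) = decide (c.toNat = d.toNat) := by
  by_cases h : c = d
  · subst h; simp
  · rw [beq_eq_false_iff_ne.mpr h]
    symm
    simp only [decide_eq_false_iff_not]
    exact fun hn => h (Char.ext (UInt32.toNat_inj.mp hn))

lemma isB_eq_brk (c : Char) (hd : pvDomChar c = true) :
    (decide (c.toNat = 10) || decide (c.toNat = 13) || decide (c.toNat = 11) || decide (c.toNat = 12) ||
     decide (c.toNat = 28) || decide (c.toNat = 29) || decide (c.toNat = 30) || decide (c.toNat = 133) ||
     decide (c.toNat = 8232) || decide (c.toNat = 8233)) = brkC c := by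
  simp only [pvDomChar, Bool.or_eq_true, Bool.and_eq_true, decide_eq_true_eq, beq_iff_eq] at hd
  rw [← Bool.coe_iff_coe]
  simp only [brkC, Bool.or_eq_true, decide_eq_true_eq, char_beq_toNat,
    show ('\n' : Char).toNat = 10 from by decide, show ('\r' : Char).toNat = 13 from by decide]
  omega


lemma splitlines_go_nil (isB : Char → Bool) (cur : List Char) (acc : List (List Char)) :
    PySem.Chars.splitlines.go isB [] cur acc =
      if cur.isEmpty then acc.reverse else (cur.reverse :: acc).reverse := by
  rw [PySem.Chars.splitlines.go]

lemma splitlines_go_rn (isB : Char → Bool) (rest cur : List Char) (acc : List (List Char)) :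
    PySem.Chars.splitlines.go isB ('\r' :: '\n' :: rest) cur acc =
      PySem.Chars.splitlines.go isB rest [] (cur.reverse :: acc) := by
  rw [PySem.Chars.splitlines.go]

lemma splitlines_go_cons (isB : Char → Bool) (c : Char) (rest cur : List Char) (acc : List (List Char))
    (h : ¬ (c = '\r' ∧ ∃ r2, rest = '\n' :: r2)) :
    PySem.Chars.splitlines.go isB (c :: rest) cur acc =
      (if isB c then PySem.Chars.splitlines.go isB rest [] (cur.reverse :: acc)
       else PySem.Chars.splitlines.go isB rest (c :: cur) acc) := by
  rw [PySem.Chars.splitlines.go.eq_def]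
  split
  · rename_i heq
    exact absurd heq (by simp)
  · rename_i rest2 heq
    injection heq with h1 h2
    exact absurd ⟨h1, rest2, h2⟩ h
  · rename_i c2 rest2 heq
    injection heq with h1 h2
    subst h1; subst h2
    rfl

lemma splitlines_go_last (isB : Char → Bool) (n : Nat) :
    ∀ (v cur : List Char) (accL : List (List Char)), v.length ≤ n →
      (∀ c ∈ v, isB c = brkC c) → ∀ d, v.getLast? = some d → brkC d = false →
      (PySem.Chars.splitlines.go isB v cur accL).getLast? =
        some (if v.any brkC then tailNB v else cur.reverse ++ v) := by
  induction n with
  | zero =>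
    intro v cur accL hlen hIsB d hd hbd
    cases v with
    | nil => simp at hd
    | cons a b => simp at hlen
  | succ n ih =>
    intro v cur accL hlen hIsB d hd hbd
    cases v with
    | nil => simp at hd
    | cons c rest =>
      cases rest with
      | nil =>
        simp only [List.getLast?_singleton, Option.some.injEq] at hd
        subst hd
        have hbc : brkC c = false := hbd
        have hnc : ¬ (c = '\r' ∧ ∃ r2, ([] : List Char) = '\n' :: r2) := by rintro ⟨-, r2, h2⟩; simp at h2
        rw [splitlines_go_cons isB c [] cur accL hnc, hIsB c (by simp), hbc]
        simp only [Bool.false_eq_true, if_false]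
        rw [splitlines_go_nil]
        rw [if_neg (by simp)]
        simp [hbc, tailNB]
      | cons c2 rest2 =>
        have hdrest : (c2 :: rest2).getLast? = some d := by
          rw [← hd, List.getLast?_cons_cons]
        by_cases hrn : c = '\r' ∧ c2 = '\n'
        · obtain ⟨rfl, rfl⟩ := hrn
          rw [splitlines_go_rn]
          cases rest2 with
          | nil => simp at hdrest; subst hdrest; exact absurd hbd (by decide)
          | cons c3 rest3 =>
            have hd3 : (c3 :: rest3).getLast? = some d := by rw [← hdrest, List.getLast?_cons_cons]
            rw [ih (c3 :: rest3) [] (cur.reverse :: accL) (by simp at hlen ⊢; omega)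
              (fun x hx => hIsB x (by simp [hx])) d hd3 hbd]
            have hany : ('\r' :: '\n' :: c3 :: rest3).any brkC = true := by
              rw [List.any_cons]; simp [brkC]
            rw [if_pos hany]
            have e1 : tailNB ('\r' :: '\n' :: c3 :: rest3) = tailNB ('\n' :: c3 :: rest3) :=
              tailNB_cons_of_any _ _ (by rw [List.any_cons]; simp [brkC])
            by_cases h3 : (c3 :: rest3).any brkC = true
            · rw [if_pos h3, e1, tailNB_cons_of_any _ _ h3]
            · rw [if_neg h3, e1, tailNB_cons_brk '\n' _ (by decide) (Bool.eq_false_iff.mpr h3)]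
              simp
        · have hnc : ¬ (c = '\r' ∧ ∃ r2, (c2 :: rest2) = '\n' :: r2) := by
            rintro ⟨rfl, r2, h2⟩
            injection h2 with h21 h22
            exact hrn ⟨rfl, h21⟩
          rw [splitlines_go_cons isB c _ cur accL hnc, hIsB c (by simp)]
          by_cases hbc : brkC c = true
          · rw [hbc, if_pos rfl]
            rw [ih (c2 :: rest2) [] (cur.reverse :: accL) (by simp at hlen ⊢; omega)
              (fun x hx => hIsB x (by simp [hx])) d hdrest hbd]
            have hany2 : (c :: c2 :: rest2).any brkC = true := by
              rw [List.any_cons, hbc]; simp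
            rw [if_pos hany2]
            by_cases h3 : (c2 :: rest2).any brkC = true
            · rw [if_pos h3, tailNB_cons_of_any _ _ h3]
            · rw [if_neg h3, tailNB_cons_brk c _ hbc (Bool.eq_false_iff.mpr h3)]
              simp
          · rw [Bool.eq_false_iff.mpr hbc, if_neg (by simp)]
            rw [ih (c2 :: rest2) (c :: cur) accL (by simp at hlen ⊢; omega)
              (fun x hx => hIsB x (by simp [hx])) d hdrest hbd]
            have hanyeq : (c :: c2 :: rest2).any brkC = (c2 :: rest2).any brkC := by
              simp [List.any_cons, Bool.eq_false_iff.mpr hbc]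
            rw [hanyeq]
            by_cases h3 : (c2 :: rest2).any brkC = true
            · rw [if_pos h3, if_pos h3, tailNB_cons_of_any _ _ h3]
            · rw [if_neg h3, if_neg h3]
              simp

lemma rfind_cases (s sub : List Char) : PySem.Chars.rfind s sub = -1 ∨ 0 ≤ PySem.Chars.rfind s sub := by
  rw [PySem.Chars.rfind, rfind_go_eq]
  split
  · right; positivity
  · left; rfl

lemma tailNB_append_last_brk (xs ys : List Char) (b : Char) (hx : xs.getLast? = some b)
    (hb : brkC b = true) (hy : ∀ c ∈ ys, brkC c = false) : tailNB (xs ++ ys) = ys := by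
  obtain ⟨l', rfl⟩ := List.getLast?_eq_some_iff.mp hx
  unfold tailNB
  rw [List.reverse_append, List.takeWhile_append,
    if_pos (by rw [takeWhile_all_eq]; intro c hc; simp only [List.mem_reverse] at hc; simp [hy c hc]),
    show (l' ++ [b]).reverse = b :: l'.reverse from by simp,
    List.takeWhile_cons_of_neg (by simp [hb])]
  simp

lemma brk_mem_false (u : List Char) (p : Nat)
    (hn : ∀ j, p < j → u[j]? ≠ some '\n') (hr : ∀ j, p < j → u[j]? ≠ some '\r') :
    ∀ c ∈ u.drop (p+1), brkC c = false := by
  intro c hc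
  obtain ⟨j, hj, hje⟩ := List.mem_iff_getElem.mp hc
  rw [List.getElem_drop] at hje
  by_contra hb
  simp only [Bool.not_eq_false, brkC, Bool.or_eq_true, beq_iff_eq] at hb
  have := List.getElem?_eq_getElem (l := u) (i := p + 1 + j) (by rw [List.length_drop] at hj; omega)
  rcases hb with rfl | rfl
  · exact hn (p+1+j) (by omega) (by rw [this, hje])
  · exact hr (p+1+j) (by omega) (by rw [this, hje])

lemma drop_eq_tailNB (u : List Char) (m : Int) (b : Char) (hm0 : 0 ≤ m)
    (hp : u[m.toNat]? = some b)
    (hn : ∀ j, m.toNat < j → u[j]? ≠ some '\n') (hr : ∀ j, m.toNat < j → u[j]? ≠ some '\r')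
    (hb : brkC b = true) :
    u.drop (m + 1).toNat = tailNB u := by
  have hplen : m.toNat < u.length := by
    by_contra hge
    rw [List.getElem?_eq_none (by omega)] at hp
    simp at hp
  have hsplit : u = u.take (m.toNat + 1) ++ u.drop (m.toNat + 1) := (List.take_append_drop _ _).symm
  have hlastTake : (u.take (m.toNat + 1)).getLast? = some b := by
    rw [List.take_succ, List.getElem?_eq_getElem hplen]
    simp only [Option.toList_some]
    rw [List.getLast?_concat]
    rw [List.getElem?_eq_getElem hplen] at hp
    simpa using hp
  have := tailNB_append_last_brk (u.take (m.toNat + 1)) (u.drop (m.toNat + 1)) b hlastTake hb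
    (brk_mem_false u m.toNat hn hr)
  rw [← hsplit] at this
  rw [this]
  congr 1
  omega

lemma drop_max_rfind (u : List Char) :
    u.drop ((max (PySem.Chars.rfind u ['\n']) (PySem.Chars.rfind u ['\r'])) + 1).toNat = tailNB u := by
  have hnn : (['\n'] : List Char) ≠ [] := by simp
  have hrr : (['\r'] : List Char) ≠ [] := by simp
  have hget : ∀ (b : Char) (j : Nat), ([b].isPrefixOf (u.drop j)) = true ↔ u[j]? = some b := by
    intro b j
    rw [single_isPrefixOf]
    rw [List.head?_drop]
  rcases rfind_cases u ['\n'] with h1 | h1 <;> rcases rfind_cases u ['\r'] with h2 | h2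
  · -- both -1
    rw [h1, h2]
    norm_num
    rw [tailNB_of_not_any]
    by_contra hany
    simp only [Bool.not_eq_false, List.any_eq_true, brkC, Bool.or_eq_true, beq_iff_eq] at hany
    obtain ⟨c, hc, hcb⟩ := hany
    obtain ⟨j, hj, hje⟩ := List.mem_iff_getElem.mp hc
    have hj2 := List.getElem?_eq_getElem (l := u) (i := j) hj
    rcases hcb with rfl | rfl
    · exact absurd ((hget '\n' j).mpr (by rw [hj2, hje])) (by simp [rfind_neg u ['\n'] hnn h1 j])
    · exact absurd ((hget '\r' j).mpr (by rw [hj2, hje])) (by simp [rfind_neg u ['\r'] hrr h2 j])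
  · -- only CR found
    rw [max_eq_right (by omega : PySem.Chars.rfind u ['\n'] ≤ PySem.Chars.rfind u ['\r'])]
    have hs := rfind_nonneg_spec u ['\r'] hrr h2
    exact drop_eq_tailNB u _ '\r' (by omega)
      ((hget _ _).mp (by simpa using hs.1))
      (fun j hj => by
        have := rfind_neg u ['\n'] hnn h1 j
        exact fun hc => by simp [(hget '\n' j).mpr hc] at this)
      (fun j hj => by
        have := hs.2 j (by omega)
        exact fun hc => by simp [(hget '\r' j).mpr hc] at this)
      (by decide)
  · -- only NL found
    rw [max_eq_left (by omega : PySem.Chars.rfind u ['\r'] ≤ PySem.Chars.rfind u ['\n'])]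
    have hs := rfind_nonneg_spec u ['\n'] hnn h1
    exact drop_eq_tailNB u _ '\n' (by omega)
      ((hget _ _).mp (by simpa using hs.1))
      (fun j hj => by
        have := hs.2 j (by omega)
        exact fun hc => by simp [(hget '\n' j).mpr hc] at this)
      (fun j hj => by
        have := rfind_neg u ['\r'] hrr h2 j
        exact fun hc => by simp [(hget '\r' j).mpr hc] at this)
      (by decide)
  · -- both found
    rcases le_total (PySem.Chars.rfind u ['\n']) (PySem.Chars.rfind u ['\r']) with hle | hle
    · rw [max_eq_right hle]
      have hs := rfind_nonneg_spec u ['\r'] hrr h2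
      have hsn := rfind_nonneg_spec u ['\n'] hnn h1
      exact drop_eq_tailNB u _ '\r' (by omega)
        ((hget _ _).mp (by simpa using hs.1))
        (fun j hj => by
          have := hsn.2 j (by omega)
          exact fun hc => by simp [(hget '\n' j).mpr hc] at this)
        (fun j hj => by
          have := hs.2 j (by omega)
          exact fun hc => by simp [(hget '\r' j).mpr hc] at this)
        (by decide)
    · rw [max_eq_left hle]
      have hs := rfind_nonneg_spec u ['\n'] hnn h1
      have hsr := rfind_nonneg_spec u ['\r'] hrr h2
      exact drop_eq_tailNB u _ '\n' (by omega)
        ((hget _ _).mp (by simpa using hs.1))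
        (fun j hj => by
          have := hs.2 j (by omega)
          exact fun hc => by simp [(hget '\n' j).mpr hc] at this)
        (fun j hj => by
          have := hsr.2 j (by omega)
          exact fun hc => by simp [(hget '\r' j).mpr hc] at this)
        (by decide)


-- ---- last element through map + filter ----

lemma filter_map_getLast (xs : List (List Char)) (z : List Char)
    (hz : xs.getLast? = some z) (hp : (PySem.Chars.strip z).isEmpty = false) :
    ((xs.map PySem.Chars.strip).filter (fun b => !b.isEmpty)).getLast? = some (PySem.Chars.strip z) := by
  obtain ⟨l', rfl⟩ := List.getLast?_eq_some_iff.mp hz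
  rw [List.map_append, List.filter_append]
  simp only [List.map_cons, List.map_nil, List.filter_cons, List.filter_nil, hp]
  simp only [Bool.not_false, if_pos]
  rw [List.getLast?_concat]

-- ---- membership transfer ----

lemma mem_lstrip {c : Char} {v : List Char} (h : c ∈ PySem.Chars.lstrip v) : c ∈ v :=
  (List.dropWhile_sublist _).mem h

lemma mem_strip {c : Char} {v : List Char} (h : c ∈ PySem.Chars.strip v) : c ∈ v := by
  unfold PySem.Chars.strip PySem.Chars.rstrip at h
  simp only [List.mem_reverse] at h
  exact mem_lstrip (List.mem_reverse.mp ((List.dropWhile_sublist _).mem h))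

-- ---- getLast? through suffixes ----

lemma getLast?_of_suffix {xs ys : List Char} (h : xs <:+ ys) (hne : xs ≠ []) :
    ys.getLast? = xs.getLast? := by
  obtain ⟨w, rfl⟩ := h
  exact List.getLast?_append_of_ne_nil w hne

lemma lstrip_ne_nil_getLast (v : List Char) (d : Char) (hl : v.getLast? = some d)
    (hd : PySem.Chars.isspace d = false) :
    PySem.Chars.lstrip v ≠ [] ∧ (PySem.Chars.lstrip v).getLast? = some d := by
  have hne : PySem.Chars.lstrip v ≠ [] := by
    intro hnil
    unfold PySem.Chars.lstrip at hnil
    rw [List.dropWhile_eq_nil_iff] at hnil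
    have hdm : d ∈ v := by
      obtain ⟨l', rfl⟩ := List.getLast?_eq_some_iff.mp hl
      simp
    exact absurd (hnil d hdm) (by simp [hd])
  refine ⟨hne, ?_⟩
  have hsfx := getLast?_of_suffix (List.dropWhile_suffix PySem.Chars.isspace (l := v))
    (by unfold PySem.Chars.lstrip at hne; exact hne)
  unfold PySem.Chars.lstrip
  rw [← hsfx, hl]

-- ---- two-char prefix shape ----

lemma two_prefix (l : List Char) :
    (['\n', '\n'] : List Char).isPrefixOf l = true ↔ ∃ rest, l = '\n' :: '\n' :: rest := by
  rw [List.isPrefixOf_iff_prefix]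
  constructor
  · intro h
    obtain ⟨rest, hrest⟩ := h
    exact ⟨rest, by rw [← hrest]; rfl⟩
  · rintro ⟨rest, rfl⟩
    exact ⟨rest, rfl⟩

-- ---- splitlines wrapper ----

lemma splitlines_last (v : List Char) (hdom : ∀ c ∈ v, pvDomChar c = true) (d : Char)
    (hd : v.getLast? = some d) (hbd : brkC d = false) :
    (PySem.Chars.splitlines v).getLast? = some (tailNB v) := by
  have h := splitlines_go_last _ v.length v [] [] le_rfl
    (fun c hc => isB_eq_brk c (hdom c hc)) d hd hbd
  have h2 : (PySem.Chars.splitlines v).getLast? =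
      some (if v.any brkC then tailNB v else ([] : List Char).reverse ++ v) := h
  rw [h2]
  by_cases hany : v.any brkC = true
  · rw [if_pos hany]
  · rw [if_neg hany, tailNB_of_not_any v (Bool.eq_false_iff.mpr hany)]
    simp

-- ---- final-stage helper: from the last line to both return values ----

lemma a_last_stage (lines : List (List Char)) (w : List Char) (h : lines.getLast? = some w) :
    (if 3 ≤ lines.length then String.ofList ((PySem.List.pyGet? lines (-1)).getD [])
     else if !lines.isEmpty then String.ofList ((PySem.List.pyGet? lines (-1)).getD []) else "") =
      String.ofList w := by
  have hne : lines ≠ [] := by intro hnil; rw [hnil] at h; simp at h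
  have hval : (PySem.List.pyGet? lines (-1)).getD [] = w := by rw [pyGet_neg_one, h]; rfl
  by_cases h3 : 3 ≤ lines.length
  · rw [if_pos h3, hval]
  · rw [if_neg h3, if_pos (by simp [hne]), hval]

-- ---- the two sides agree on a nonempty stripped text ----

lemma main_nonempty (t : List Char) (hdom : ∀ c ∈ t, pvDomChar c = true)
    (hts : PySem.Chars.strip t = t) (d : Char) (hd : t.getLast? = some d)
    (hdws : PySem.Chars.isspace d = false) :
    ∃ u : List Char, (∀ c ∈ u, pvDomChar c = true) ∧ u.getLast? = some d ∧
      PySem.Chars.lstrip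
        (PySem.Chars.slice t (some (if 0 ≤ PySem.Chars.rfind t ['\n', '\n']
          then PySem.Chars.rfind t ['\n', '\n'] + 2 else 0)) none) = u ∧
      ((PySem.Chars.splitOn t ['\n', '\n']).map PySem.Chars.strip).filter
          (fun b => !b.isEmpty) ≠ [] ∧
      (((PySem.Chars.splitOn t ['\n', '\n']).map PySem.Chars.strip).filter
          (fun b => !b.isEmpty)).getLast? = some u := by
  have hbd : brkC d = false := not_ws_not_brk d hdws
  have htne : t ≠ [] := by intro hnil; rw [hnil] at hd; simp at hd
  have hsep : (['\n', '\n'] : List Char) ≠ [] := by simp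
  have hsplit : PySem.Chars.splitOn t ['\n', '\n'] =
      PySem.Chars.splitOn.go ['\n', '\n'] (t.length + 1) t [] [] := rfl
  rcases rfind_cases t ['\n', '\n'] with hk | hk
  · -- no separator anywhere
    have hnp := rfind_neg t ['\n', '\n'] hsep hk
    have hgo := splitOn_go_nosep ['\n', '\n'] hsep (t.length + 1) t [] []
      (by omega) (fun j => hnp j)
    refine ⟨t, hdom, hd, ?_, ?_, ?_⟩
    · rw [hk]
      rw [if_neg (by omega)]
      have hslice : PySem.Chars.slice t (some 0) none = t := by
        simp only [PySem.Chars.slice_eq_listSlice]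
        rw [PySem.List.slice_from t (a := 0) le_rfl]
        simp
      rw [hslice]
      cases hh : t.head? with
      | none => simp at hh; exact absurd hh htne
      | some c0 =>
        exact lstrip_idem_head t c0 hh (strip_head_not_ws t c0 (by rw [hts, hh]))
    · rw [hsplit, hgo]
      simp only [List.reverse_nil, List.nil_append, List.map_cons, List.map_nil]
      rw [hts]
      simp [List.filter_cons, htne]
    · rw [hsplit, hgo]
      simp only [List.reverse_nil, List.nil_append, List.map_cons, List.map_nil]
      rw [hts]
      simp [List.filter_cons, htne]
  · -- has a separator
    have hs := rfind_nonneg_spec t ['\n', '\n'] hsep hk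
    set r := (PySem.Chars.rfind t ['\n', '\n']).toNat with hrdef
    have hocc : ∃ j, (['\n', '\n'] : List Char).isPrefixOf (t.drop j) = true := ⟨r, hs.1⟩
    obtain ⟨j, hpj, hmax, hlastgo⟩ := splitOn_go_last (t.length + 1) t [] [] (by omega) hocc
    -- j ≤ r ≤ j + 1
    have hjr : j ≤ r := by
      by_contra hgt
      have := hs.2 j (by omega)
      rw [hpj] at this
      exact Bool.noConfusion this
    have hrj : r ≤ j + 1 := by
      by_contra hgt
      have := hmax r (by omega)
      rw [hs.1] at this
      exact Bool.noConfusion this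
    -- the last raw piece
    have hlen2 : j + 2 ≤ t.length := by
      obtain ⟨rest, hrest⟩ := (two_prefix _).mp hpj
      have := congrArg List.length hrest
      simp only [List.length_drop, List.length_cons] at this
      omega
    have hlt : j + 2 < t.length := by
      rcases Nat.lt_or_ge (j+2) t.length with h | h
      · exact h
      · exfalso
        obtain ⟨rest, hrest⟩ := (two_prefix _).mp hpj
        have hrlen := congrArg List.length hrest
        simp only [List.length_drop, List.length_cons] at hrlen
        have hrest0 : rest = [] := by
          have : rest.length = 0 := by omega
          exact List.length_eq_zero_iff.mp this
        rw [hrest0] at hrest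
        have hdn : t.getLast? = some '\n' := by
          rw [getLast?_of_suffix (List.drop_suffix j t) (by rw [hrest]; simp), hrest]
          rfl
        rw [hd] at hdn
        injection hdn with hdn
        rw [hdn] at hbd
        exact absurd hbd (by decide)
    have hpiece_ne : t.drop (j + 2) ≠ [] := by
      rw [ne_eq, List.drop_eq_nil_iff]
      omega
    have hpiece_last : (t.drop (j + 2)).getLast? = some d := by
      rw [← getLast?_of_suffix (List.drop_suffix (j+2) t) hpiece_ne, hd]
    obtain ⟨hlne, hllast⟩ := lstrip_ne_nil_getLast (t.drop (j + 2)) d hpiece_last hdws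
    refine ⟨PySem.Chars.lstrip (t.drop (j + 2)), ?_, hllast, ?_, ?_, ?_⟩
    · exact fun c hc => hdom c ((List.drop_subset _ _) (mem_lstrip hc))
    · -- B's u equals lstrip of the piece
      rw [if_pos (by omega)]
      have hslice : PySem.Chars.slice t (some (PySem.Chars.rfind t ['\n', '\n'] + 2)) none =
          t.drop (r + 2) := by
        simp only [PySem.Chars.slice_eq_listSlice]
        rw [PySem.List.slice_from t (a := PySem.Chars.rfind t ['\n', '\n'] + 2) (by omega)]
        congr 1
        omega
      rw [hslice]
      rcases Nat.eq_or_lt_of_le hjr with hcase | hcase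
      · rw [← hcase]
      · -- r = j + 1 : the piece starts with an extra newline that lstrip removes
        have hreq : r = j + 1 := by omega
        obtain ⟨rest, hrest⟩ := (two_prefix _).mp (hreq ▸ hs.1)
        have hdj2 : t.drop (j + 2) = '\n' :: t.drop (j + 3) := by
          have h1 : t.drop (j + 2) = List.drop 1 (t.drop (j + 1)) := by
            rw [List.drop_drop]
          have h2 : t.drop (j + 3) = List.drop 2 (t.drop (j + 1)) := by
            rw [List.drop_drop]
          rw [h1, h2, hrest]
          rfl
        rw [hreq, show j + 1 + 2 = j + 3 from by omega, hdj2]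
        unfold PySem.Chars.lstrip
        rw [List.dropWhile_cons_of_pos (by decide)]
    · -- blocks nonempty
      intro hnil
      have := filter_map_getLast _ _ ((hsplit ▸ hlastgo) :
          (PySem.Chars.splitOn t ['\n', '\n']).getLast? = some (t.drop (j + 2)))
        (by
          rw [strip_eq_lstrip _ d hpiece_last hdws]
          simp [hlne])
      rw [hnil] at this
      simp at this
    · have := filter_map_getLast _ _ ((hsplit ▸ hlastgo) :
          (PySem.Chars.splitOn t ['\n', '\n']).getLast? = some (t.drop (j + 2)))
        (by
          rw [strip_eq_lstrip _ d hpiece_last hdws]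
          simp [hlne])
      rw [this, strip_eq_lstrip _ d hpiece_last hdws]

theorem main_equal (srt_text : String) (hdom : Dom_extract_latest_line_from_srt srt_text) :
    extract_latest_line_from_srt srt_text = extract_latest_line_from_srt_alt srt_text := by
  have hdom' : ∀ c ∈ srt_text.toList, pvDomChar c = true := by
    intro c hc
    exact List.all_eq_true.mp hdom c hc
  rw [extract_latest_line_from_srt, extract_latest_line_from_srt_alt]
  by_cases htnil : PySem.Chars.strip srt_text.toList = []
  · -- stripped text empty: both return ""
    rw [htnil]
    simp only [List.isEmpty_nil, if_true]
    by_cases hsnil : srt_text.toList.isEmpty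
    · rw [if_pos hsnil]
    · rw [if_neg hsnil]
      have hgo := splitOn_go_nosep ['\n', '\n'] (by simp) (([] : List Char).length + 1) [] [] []
        (by simp) (by intro j; simp [List.isPrefixOf])
      rw [show PySem.Chars.splitOn ([] : List Char) ['\n', '\n'] =
        PySem.Chars.splitOn.go ['\n', '\n'] (([] : List Char).length + 1) [] [] [] from rfl, hgo]
      simp [PySem.Chars.strip, PySem.Chars.lstrip, PySem.Chars.rstrip]
  · -- stripped text nonempty
    have htne := htnil
    set t := PySem.Chars.strip srt_text.toList with htdef
    have hts : PySem.Chars.strip t = t := strip_idem srt_text.toList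
    have hdomt : ∀ c ∈ t, pvDomChar c = true := fun c hc => hdom' c (mem_strip hc)
    obtain ⟨d, hd⟩ : ∃ d, t.getLast? = some d := by
      cases hl : t.getLast? with
      | none => rw [List.getLast?_eq_none_iff] at hl; exact absurd hl htne
      | some d => exact ⟨d, rfl⟩
    have hdws : PySem.Chars.isspace d = false := strip_last_not_ws srt_text.toList d (htdef ▸ hd)
    have hsnil : srt_text.toList.isEmpty = false := by
      rw [List.isEmpty_eq_false_iff]
      intro hnil
      rw [htdef, hnil] at htne
      exact htne rfl
    rw [hsnil]
    simp only [Bool.false_eq_true, if_false]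
    obtain ⟨u, hudom, hud, huB, hbne, hblast⟩ := main_nonempty t hdomt hts d hd hdws
    rw [if_neg (by rw [List.isEmpty_iff]; exact hbne)]
    rw [pyGet_neg_one, hblast]
    simp only [Option.getD_some]
    have hlines := splitlines_last u hudom d hud (not_ws_not_brk d hdws)
    rw [a_last_stage _ _ hlines]
    rw [if_neg (by rw [List.isEmpty_iff]; exact htne)]
    rw [huB]
    congr 1
    have hi : -1 ≤ max (PySem.Chars.rfind u ['\n']) (PySem.Chars.rfind u ['\r']) := by
      rcases rfind_cases u ['\n'] with h | h <;> omega
    have hslice : PySem.Chars.slice u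
        (some (max (PySem.Chars.rfind u ['\n']) (PySem.Chars.rfind u ['\r']) + 1)) none =
        u.drop (max (PySem.Chars.rfind u ['\n']) (PySem.Chars.rfind u ['\r']) + 1).toNat := by
      simp only [PySem.Chars.slice_eq_listSlice]
      exact PySem.List.slice_from u (by omega)
    rw [hslice, drop_max_rfind]

-- ===== VERDICT (by name: the statement is the Claim_ definition above) =====
theorem extract_latest_line_from_srt_spec : Claim_equal_extract_latest_line_from_srt := by
  intro s hdom
  unfold Spec_extract_latest_line_from_srt
  exact main_equal s hdom
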